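-- pv_equiv track=rewrite | github.com/CZboop/Challenges-and-Interview-Question-Practice | codewars/python/heggeleggleggo.py | heggeleggleggo
-- ===== SOURCE A (Python) =====
-- def heggeleggleggo(word):
--     new = ""
--     for i in word:
--         if i.lower() in "aeiou ":
--             new+=i
--         else:
--             new+=i+"egg"
--     return new
-- ===== SOURCE B (Python) =====
-- import re
--
-- def heggeleggleggo(word):
--     return re.sub(r'[^aeiouAEIOU ]', lambda m: m.group() + 'egg', word)
-- ===== Notes on version B (the rewrite author's own statement) =====
-- stated objective: idiomatic
-- what changed: Replaced the explicit character-by-character accumulator loop with one regex substitution that appends 'egg' after every character outside the class [aeiouAEIOU ].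
import Mathlib
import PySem

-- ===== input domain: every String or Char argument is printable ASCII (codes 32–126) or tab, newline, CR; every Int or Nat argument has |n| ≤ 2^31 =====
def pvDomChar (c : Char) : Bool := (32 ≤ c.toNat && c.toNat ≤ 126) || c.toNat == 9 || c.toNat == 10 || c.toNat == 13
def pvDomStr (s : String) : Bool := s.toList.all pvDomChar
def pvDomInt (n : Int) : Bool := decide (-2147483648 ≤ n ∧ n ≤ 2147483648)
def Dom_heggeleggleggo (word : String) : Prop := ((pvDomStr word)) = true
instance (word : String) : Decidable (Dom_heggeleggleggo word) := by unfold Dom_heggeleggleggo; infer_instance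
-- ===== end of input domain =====

-- B replaces A's character-accumulator loop by one regex substitution ([^aeiouAEIOU ] → match + "egg"); idiomatic, same output.

-- ===== PORT A =====
def heggeleggleggo (word : String) : String :=
  String.mk (word.toList.foldl
    (fun new i =>
      if "aeiou ".toList.contains (PySem.Chars.lowerChar i) then new ++ [i]
      else new ++ [i] ++ "egg".toList) [])

-- ===== PORT B =====
-- re.sub ported match by match: every char in the class [^aeiouAEIOU ] is replaced by itself ++ "egg",
-- chars outside the class are kept; the results are concatenated (flatMap).
def heggeleggleggo_alt (word : String) : String :=
  String.mk (word.toList.flatMap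
    (fun c => if "aeiouAEIOU ".toList.contains c then [c] else c :: "egg".toList))

-- ===== PRECONDITION & SPEC =====
def Spec_heggeleggleggo (word : String) (out : String) : Prop := out = heggeleggleggo_alt word
instance (word : String) (out : String) : Decidable (Spec_heggeleggleggo word out) := by unfold Spec_heggeleggleggo; infer_instance

-- ===== CLAIM (what is proved, stated in full; the proofs are below) =====
def Claim_equal_heggeleggleggo : Prop := ∀ (word : String), Dom_heggeleggleggo word → Spec_heggeleggleggo word (heggeleggleggo word)

-- ===== LEMMAS AND PROOFS =====

theorem pv_charEq (a b : Char) : a = b ↔ a.toNat = b.toNat := by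
  constructor
  · intro h; rw [h]
  · intro h; apply Char.ext; exact UInt32.toNat_inj.mp h

-- A's test (lowercased char among "aeiou ") equals B's "char is outside the class [^aeiouAEIOU ]"
theorem pv_cond_eq (i : Char) :
    ("aeiou ".toList.contains (PySem.Chars.lowerChar i))
      = ("aeiouAEIOU ".toList.contains i) := by
  have e1 : "aeiou ".toList = ['a','e','i','o','u',' '] := rfl
  have e2 : "aeiouAEIOU ".toList = ['a','e','i','o','u','A','E','I','O','U',' '] := rfl
  simp only [PySem.Chars.lowerChar, PySem.Chars.isupper, e1, e2]
  by_cases h : ('A' ≤ i ∧ i ≤ 'Z')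
  · have h1 : 65 ≤ i.toNat := h.1
    have h2 : i.toNat ≤ 90 := h.2
    rw [if_pos (by simp [h.1, h.2])]
    have hv : (Char.ofNat (i.toNat + 32)).toNat = i.toNat + 32 := by
      unfold Char.ofNat
      rw [dif_pos (Or.inl (by omega))]
      rfl
    simp only [List.contains_eq_mem, List.mem_cons, List.not_mem_nil, or_false,
      pv_charEq, hv, decide_eq_decide, show ('a':Char).toNat = 97 from rfl, show ('e':Char).toNat = 101 from rfl, show ('i':Char).toNat = 105 from rfl, show ('o':Char).toNat = 111 from rfl, show ('u':Char).toNat = 117 from rfl, show (' ':Char).toNat = 32 from rfl, show ('A':Char).toNat = 65 from rfl, show ('E':Char).toNat = 69 from rfl, show ('I':Char).toNat = 73 from rfl, show ('O':Char).toNat = 79 from rfl, show ('U':Char).toNat = 85 from rfl]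
    omega
  · have h1 : i.toNat < 65 ∨ 90 < i.toNat := by
      rcases not_and_or.mp h with h' | h'
      · left; rw [Char.not_le] at h'; exact h'
      · right; rw [Char.not_le] at h'; exact h'
    rw [if_neg (by rcases not_and_or.mp h with h' | h' <;> simp [h'])]
    simp only [List.contains_eq_mem, List.mem_cons, List.not_mem_nil, or_false,
      pv_charEq, decide_eq_decide, show ('a':Char).toNat = 97 from rfl, show ('e':Char).toNat = 101 from rfl, show ('i':Char).toNat = 105 from rfl, show ('o':Char).toNat = 111 from rfl, show ('u':Char).toNat = 117 from rfl, show (' ':Char).toNat = 32 from rfl, show ('A':Char).toNat = 65 from rfl, show ('E':Char).toNat = 69 from rfl, show ('I':Char).toNat = 73 from rfl, show ('O':Char).toNat = 79 from rfl, show ('U':Char).toNat = 85 from rfl]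
    omega

-- A's fold over an arbitrary accumulator is the accumulator followed by B's flatMap
theorem pv_fold_eq (cs : List Char) (acc : List Char) :
    cs.foldl
      (fun new i =>
        if "aeiou ".toList.contains (PySem.Chars.lowerChar i) then new ++ [i]
        else new ++ [i] ++ "egg".toList) acc
    = acc ++ cs.flatMap
        (fun c => if "aeiouAEIOU ".toList.contains c then [c] else c :: "egg".toList) := by
  induction cs generalizing acc with
  | nil => simp
  | cons c cs ih =>
    rw [List.foldl_cons, List.flatMap_cons, pv_cond_eq c]
    by_cases h : ("aeiouAEIOU ".toList.contains c) = true
    · rw [if_pos h, if_pos h, ih]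
      simp [List.append_assoc]
    · rw [if_neg h, if_neg h, ih]
      simp [List.append_assoc]

-- ===== VERDICT (by name: the statement is the Claim_ definition above) =====
theorem heggeleggleggo_spec : Claim_equal_heggeleggleggo := by
  intro word _
  unfold Spec_heggeleggleggo heggeleggleggo heggeleggleggo_alt
  rw [pv_fold_eq]
  simp
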